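-- pv_equiv track=rewrite | github.com/wnstjr9711/Creativelearning | python/ScriptProgramming Termproject/ProjectFinal.py | similarity_plus
-- ===== SOURCE A (Python) =====
-- def similarity_plus(s, dictionary, similar):
--     index = 0                           # url 순서
--     for d in dictionary:                # url 순서대로 사전 불러오기
--         for word in s:                  # 비교할 입력 단어
--             for key_index in range(len(d)):    # 사전 key 에 접근하기 위함
--                 # 입력단어의 두글자조합이 사전에 있는 단어에 포함돼있으면 유사한 단어로 간주하여 1점을 준다.
--                 # (예 - 입력단어: 비밀번호, 비밀/밀번/번호으로 검색)
--                 for two in range(len(word) - 1): # 입력단어를 두글자씩 묶은 조합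
--                     if word.lower()[two:two+2] in list(d.keys())[key_index]:    # 사전의 단어에 직접접근한다.
--                         similar[index] += d[list(d.keys())[key_index]]    # 키값(빈도수)을 점수로 준다.
--         index += 1
--     return similar
-- ===== SOURCE B (Python) =====
-- def similarity_plus(s, dictionary, similar):
--     # Aggregate all two-gram occurrences of the (lowercased) input words once.
--     counts = {}
--     for word in s:
--         w = word.lower()
--         for i in range(len(w) - 1):
--             g = w[i:i+2]
--             counts[g] = counts.get(g, 0) + 1
--     # Score each url's dictionary against the aggregated two-gram frequency table.
--     for index, d in enumerate(dictionary):
--         total = 0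
--         for key, freq in d.items():
--             for g, cnt in counts.items():
--                 if g in key:
--                     total += freq * cnt
--         similar[index] += total
--     return similar
-- ===== Notes on version B (the rewrite author's own statement) =====
-- stated objective: faster
-- what changed: B builds a Counter of all lowercased two-gram occurrences of the input words in one pass, then scores each url's dictionary once against that aggregated table (freq*count per unique two-gram), instead of A's per-dictionary rescan of every word, every position and a list(d.keys()) rebuild plus word.lower() recomputation in the innermost loop.
-- outside the precondition, e.g. on similarity_plus([], [{'ab': 1}], []): A returns [], B raises IndexError
import Mathlib
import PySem

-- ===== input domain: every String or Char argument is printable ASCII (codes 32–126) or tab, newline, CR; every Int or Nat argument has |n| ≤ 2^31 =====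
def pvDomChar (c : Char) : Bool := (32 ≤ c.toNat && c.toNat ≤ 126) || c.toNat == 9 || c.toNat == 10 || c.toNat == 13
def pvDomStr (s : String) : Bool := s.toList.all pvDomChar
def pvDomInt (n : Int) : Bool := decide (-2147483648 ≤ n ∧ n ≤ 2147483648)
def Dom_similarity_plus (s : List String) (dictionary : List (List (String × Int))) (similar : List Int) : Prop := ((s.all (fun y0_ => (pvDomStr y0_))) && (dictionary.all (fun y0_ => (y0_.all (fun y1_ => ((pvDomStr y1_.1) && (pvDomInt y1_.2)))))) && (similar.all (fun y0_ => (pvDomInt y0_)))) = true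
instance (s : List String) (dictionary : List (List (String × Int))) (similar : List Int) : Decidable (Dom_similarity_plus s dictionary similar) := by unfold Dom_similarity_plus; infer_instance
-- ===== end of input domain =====

-- B replaces A's words×positions×keys rescan by one aggregated two-gram Counter built in a single
-- pass, then scores each dictionary once against it.  Both Pythons mutate `similar` in place and
-- return it; the equivalence proved here is about the returned value.

-- shared helper: Python's `similar[index] += v` (total here; the index is in range under Pre_)
def pyAddAt (sim : List Int) (i : Int) (v : Int) : List Int :=
  sim.set i.toNat (sim.getD i.toNat 0 + v)

-- ===== PORT A =====
def aTwoLoop (d : PySem.Dict String Int) (word : String) (idx : Int) (key_index : Int) (sim : List Int) : List Int :=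
  (PySem.List.pyRange 0 (PySem.Str.len word - 1) 1).foldl (fun sim two =>
    if PySem.Str.isIn (PySem.Str.slice (PySem.Str.lower word) (some two) (some (two + 2)))
        (PySem.List.pyGetD d.keys key_index "")
    then pyAddAt sim idx (d.getD (PySem.List.pyGetD d.keys key_index "") 0)
    else sim) sim

def aKeyLoop (d : PySem.Dict String Int) (word : String) (idx : Int) (sim : List Int) : List Int :=
  (PySem.List.pyRange 0 (PySem.Dict.size d) 1).foldl (fun sim key_index => aTwoLoop d word idx key_index sim) sim

def aWordLoop (s : List String) (d : PySem.Dict String Int) (idx : Int) (sim : List Int) : List Int :=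
  s.foldl (fun sim word => aKeyLoop d word idx sim) sim

def similarity_plus (s : List String) (dictionary : List (List (String × Int))) (similar : List Int) : List Int :=
  (dictionary.foldl (fun (st : List Int × Int) dl =>
    (aWordLoop s (PySem.Dict.ofList dl) st.2 st.1, st.2 + 1)) (similar, 0)).1

-- ===== PORT B =====
def bCounts (s : List String) : PySem.Dict String Int :=
  s.foldl (fun c word =>
    let w := PySem.Str.lower word
    (PySem.List.pyRange 0 (PySem.Str.len w - 1) 1).foldl (fun c i =>
      let g := PySem.Str.slice w (some i) (some (i + 2))
      c.insert g (c.getD g 0 + 1)) c) PySem.Dict.empty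

def bTotal (counts : PySem.Dict String Int) (d : PySem.Dict String Int) : Int :=
  d.items.foldl (fun t kv =>
    counts.items.foldl (fun t gc =>
      if PySem.Str.isIn gc.1 kv.1 then t + kv.2 * gc.2 else t) t) 0

def similarity_plus_alt (s : List String) (dictionary : List (List (String × Int))) (similar : List Int) : List Int :=
  let counts := bCounts s
  (PySem.List.enumerate dictionary 0).foldl (fun sim p =>
    pyAddAt sim p.1 (bTotal counts (PySem.Dict.ofList p.2))) similar

-- ===== PRECONDITION & SPEC =====
-- Pre_ excludes inputs where dictionary is longer than similar: there A raises IndexError as soon as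
-- any two-gram match is scored at an out-of-range index, and returns only accidentally when no match
-- reaches such an index, while B updates every index and always raises.
def Pre_similarity_plus (s : List String) (dictionary : List (List (String × Int))) (similar : List Int) : Prop :=
  dictionary.length ≤ similar.length
instance (s : List String) (dictionary : List (List (String × Int))) (similar : List Int) : Decidable (Pre_similarity_plus s dictionary similar) := by unfold Pre_similarity_plus; infer_instance

def pvWitness_similarity_plus : List String × (List (List (String × Int))) × List Int :=
  (["ab"], [[("abc", 2)]], [0])

def Spec_similarity_plus (s : List String) (dictionary : List (List (String × Int))) (similar : List Int) (out : List Int) : Prop := out = similarity_plus_alt s dictionary similar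
instance (s : List String) (dictionary : List (List (String × Int))) (similar : List Int) (out : List Int) : Decidable (Spec_similarity_plus s dictionary similar out) := by unfold Spec_similarity_plus; infer_instance

-- ===== CLAIM (what is proved, stated in full; the proofs are below) =====
def Claim_equal_similarity_plus : Prop := ∀ (s : List String) (dictionary : List (List (String × Int))) (similar : List Int), Dom_similarity_plus s dictionary similar → Pre_similarity_plus s dictionary similar → Spec_similarity_plus s dictionary similar (similarity_plus s dictionary similar)

-- ===== LEMMAS AND PROOFS =====

-- the two-gram list of one word, and of the whole input
def grams (word : String) : List String :=
  (PySem.List.pyRange 0 (PySem.Str.len word - 1) 1).map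
    (fun two => PySem.Str.slice (PySem.Str.lower word) (some two) (some (two + 2)))

def allGrams (s : List String) : List String := s.flatMap grams

-- per-dictionary score, in A's summation order
def scoreA (s : List String) (d : PySem.Dict String Int) : Int :=
  (s.map (fun word =>
    (d.keys.map (fun key =>
      ((grams word).map (fun g => if PySem.Str.isIn g key then d.getD key 0 else 0)).sum)).sum)).sum

lemma pyAddAt_zero (sim : List Int) (i : Int) : pyAddAt sim i 0 = sim := by
  unfold pyAddAt
  rcases Nat.lt_or_ge i.toNat sim.length with h | h
  · simp [List.getElem?_eq_getElem h, List.set_getElem_self]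
  · exact List.set_eq_of_length_le h

lemma pyAddAt_pyAddAt (sim : List Int) (i a b : Int) :
    pyAddAt (pyAddAt sim i a) i b = pyAddAt sim i (a + b) := by
  unfold pyAddAt
  rcases Nat.lt_or_ge i.toNat sim.length with h | h
  · simp [h, List.set_set]
    ring_nf
  · simp [List.set_eq_of_length_le h]

lemma foldl_pyAddAt {α : Type} (l : List α) (sim : List Int) (i : Int) (f : α → Int) :
    l.foldl (fun sim x => pyAddAt sim i (f x)) sim = pyAddAt sim i ((l.map f).sum) := by
  induction l generalizing sim with
  | nil => simp [pyAddAt_zero]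
  | cons x xs ih => simp [List.foldl_cons, ih, pyAddAt_pyAddAt]

lemma aTwoLoop_eq (d : PySem.Dict String Int) (word : String) (idx ki : Int) (sim : List Int) :
    aTwoLoop d word idx ki sim =
      pyAddAt sim idx (((grams word).map (fun g =>
        if PySem.Str.isIn g (PySem.List.pyGetD d.keys ki "") then
          d.getD (PySem.List.pyGetD d.keys ki "") 0 else 0)).sum) := by
  unfold aTwoLoop
  have h : (fun (sim : List Int) (two : Int) =>
      if PySem.Str.isIn (PySem.Str.slice (PySem.Str.lower word) (some two) (some (two + 2)))
          (PySem.List.pyGetD d.keys ki "")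
      then pyAddAt sim idx (d.getD (PySem.List.pyGetD d.keys ki "") 0) else sim)
      = (fun sim two => pyAddAt sim idx
          (if PySem.Str.isIn (PySem.Str.slice (PySem.Str.lower word) (some two) (some (two + 2)))
              (PySem.List.pyGetD d.keys ki "")
           then d.getD (PySem.List.pyGetD d.keys ki "") 0 else 0)) := by
    funext sim two
    split <;> simp [pyAddAt_zero]
  rw [h, foldl_pyAddAt]
  simp [grams, List.map_map, Function.comp_def]

lemma aKeyLoop_eq (d : PySem.Dict String Int) (word : String) (idx : Int) (sim : List Int) :
    aKeyLoop d word idx sim =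
      pyAddAt sim idx (((PySem.List.pyRange 0 (PySem.Dict.size d) 1).map (fun ki =>
        ((grams word).map (fun g =>
          if PySem.Str.isIn g (PySem.List.pyGetD d.keys ki "") then
            d.getD (PySem.List.pyGetD d.keys ki "") 0 else 0)).sum)).sum) := by
  unfold aKeyLoop
  have h : (fun (sim : List Int) (ki : Int) => aTwoLoop d word idx ki sim)
      = (fun sim ki => pyAddAt sim idx (((grams word).map (fun g =>
          if PySem.Str.isIn g (PySem.List.pyGetD d.keys ki "") then
            d.getD (PySem.List.pyGetD d.keys ki "") 0 else 0)).sum)) := by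
    funext sim ki; exact aTwoLoop_eq d word idx ki sim
  rw [h, foldl_pyAddAt]

-- the key_index loop over range(len(d)) is the loop over d.keys
lemma range_keys (d : PySem.Dict String Int) (f : String → Int) :
    ((PySem.List.pyRange 0 (PySem.Dict.size d) 1).map (fun ki =>
      f (PySem.List.pyGetD d.keys ki ""))).sum = (d.keys.map f).sum := by
  have hlen : (PySem.Dict.size d : Int) = PySem.List.len d.keys := by
    simp [PySem.Dict.size, PySem.Dict.keys, PySem.List.len]
  rw [hlen]
  conv_rhs => rw [← PySem.List.map_pyGetD_pyRange_zero d.keys ""]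
  rw [List.map_map]
  rfl

lemma aWordLoop_eq (s : List String) (d : PySem.Dict String Int) (idx : Int) (sim : List Int) :
    aWordLoop s d idx sim = pyAddAt sim idx (scoreA s d) := by
  unfold aWordLoop scoreA
  have h : (fun (sim : List Int) (word : String) => aKeyLoop d word idx sim)
      = (fun sim word => pyAddAt sim idx ((d.keys.map (fun key =>
          ((grams word).map (fun g => if PySem.Str.isIn g key then d.getD key 0 else 0)).sum)).sum)) := by
    funext sim word
    rw [aKeyLoop_eq, range_keys d (fun key => ((grams word).map
      (fun g => if PySem.Str.isIn g key then d.getD key 0 else 0)).sum)]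
  rw [h, foldl_pyAddAt]

lemma similarity_plus_eq (s : List String) (dictionary : List (List (String × Int))) (similar : List Int) :
    similarity_plus s dictionary similar =
      (PySem.List.enumerate dictionary 0).foldl (fun sim p =>
        pyAddAt sim p.1 (scoreA s (PySem.Dict.ofList p.2))) similar := by
  unfold similarity_plus
  suffices h : ∀ (dict : List (List (String × Int))) (sim : List Int) (i : Int),
      (dict.foldl (fun (st : List Int × Int) dl =>
        (aWordLoop s (PySem.Dict.ofList dl) st.2 st.1, st.2 + 1)) (sim, i)).1
      = (PySem.List.enumerate dict i).foldl (fun sim p =>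
          pyAddAt sim p.1 (scoreA s (PySem.Dict.ofList p.2))) sim by
    exact h dictionary similar 0
  intro dict
  induction dict with
  | nil => intro sim i; simp [PySem.List.enumerate_nil]
  | cons dl rest ih =>
    intro sim i
    rw [List.foldl_cons, ih, PySem.List.enumerate_cons, List.foldl_cons, aWordLoop_eq]

-- ---- B side ----

lemma bCounts_eq (s : List String) : bCounts s = PySem.Dict.counter (allGrams s) := by
  rw [← PySem.Dict.foldl_insert_getD_add_one_eq_counter]
  unfold allGrams
  rw [List.foldl_flatMap]
  unfold bCounts
  congr 1
  funext c word
  show (PySem.List.pyRange 0 (PySem.Str.len (PySem.Str.lower word) - 1) 1).foldl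
      (fun c i => c.insert (PySem.Str.slice (PySem.Str.lower word) (some i) (some (i + 2)))
        (c.getD (PySem.Str.slice (PySem.Str.lower word) (some i) (some (i + 2))) 0 + 1)) c
      = List.foldl (fun d x => d.insert x (d.getD x 0 + 1)) c (grams word)
  have hl : PySem.Str.len (PySem.Str.lower word) = PySem.Str.len word := by
    simp [PySem.Str.len_eq, PySem.Str.toList_lower, PySem.Chars.lower]
  rw [hl]
  unfold grams
  rw [List.foldl_map]

lemma foldl_if_add {α : Type} (l : List α) (t0 : Int) (p : α → Bool) (v : α → Int) :
    l.foldl (fun t x => if p x then t + v x else t) t0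
      = t0 + (l.map (fun x => if p x then v x else 0)).sum := by
  have h : (fun (t : Int) (x : α) => if p x then t + v x else t)
      = (fun t x => t + (if p x then v x else 0)) := by
    funext t x; split <;> simp
  rw [h, PySem.List.foldl_add]

lemma bTotal_eq (counts d : PySem.Dict String Int) :
    bTotal counts d = (d.items.map (fun kv =>
      (counts.items.map (fun gc => if PySem.Str.isIn gc.1 kv.1 then kv.2 * gc.2 else 0)).sum)).sum := by
  unfold bTotal
  have h : (fun (t : Int) (kv : String × Int) =>
      counts.items.foldl (fun t gc => if PySem.Str.isIn gc.1 kv.1 then t + kv.2 * gc.2 else t) t)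
      = (fun t kv => t + (counts.items.map
          (fun gc => if PySem.Str.isIn gc.1 kv.1 then kv.2 * gc.2 else 0)).sum) := by
    funext t kv
    rw [foldl_if_add]
  rw [h, PySem.List.foldl_add]
  simp

-- summing f over a Nodup list that contains x, weighted by (· = x), picks out f x
lemma sum_pick {α : Type} [DecidableEq α] (K : List α) (hnd : K.Nodup) (x : α) (hx : x ∈ K) (f : α → Int) :
    (K.map (fun g => if g = x then f g else 0)).sum = f x := by
  induction K with
  | nil => cases hx
  | cons a K ih =>
    by_cases hax : a = x
    · subst hax
      have hz : (K.map (fun g => if g = a then f g else 0)).sum = 0 := by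
        apply List.sum_eq_zero
        intro y hy
        rcases List.mem_map.1 hy with ⟨g, hg, rfl⟩
        have hga : g ≠ a := fun h => (List.nodup_cons.1 hnd).1 (h ▸ hg)
        exact if_neg hga
      simp [hz]
    · have hx' : x ∈ K := by
        rcases List.mem_cons.1 hx with h | h
        · exact absurd h.symm hax
        · exact h
      simp only [List.map_cons, List.sum_cons, if_neg hax]
      rw [ih (List.nodup_cons.1 hnd).2 hx', zero_add]

-- a Nodup key list covering L turns counted sums back into plain sums over L
lemma sum_count {α : Type} [DecidableEq α] (L K : List α) (hnd : K.Nodup)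
    (hcov : ∀ x ∈ L, x ∈ K) (f : α → Int) :
    (K.map (fun g => f g * (L.count g : Int))).sum = (L.map f).sum := by
  induction L with
  | nil => simp
  | cons x L ih =>
    have hx : x ∈ K := hcov x List.mem_cons_self
    have hstep : (fun g => f g * (((x :: L).count g : Nat) : Int))
        = (fun g => f g * (L.count g : Int) + (if g = x then f g else 0)) := by
      funext g
      have hc : (((x :: L).count g : Nat) : Int) = (L.count g : Int) + (if g = x then 1 else 0) := by
        by_cases h : g = x
        · subst h
          rw [List.count_cons_self, if_pos rfl]
          push_cast
          ring
        · rw [List.count_cons_of_ne (fun hh => h hh.symm), if_neg h, add_zero]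
      rw [hc]
      by_cases h : g = x
      · rw [if_pos h, if_pos h]
        ring
      · rw [if_neg h, if_neg h]
        ring
    rw [hstep, PySem.List.sum_map_add_int, ih (fun y hy => hcov y (List.mem_cons_of_mem _ hy)),
      sum_pick K hnd x hx f, List.map_cons, List.sum_cons, add_comm]

lemma sum_items_counter (L : List String) (F : String → Int) :
    (((PySem.Dict.counter L).items).map (fun gc => F gc.1 * gc.2)).sum = (L.map F).sum := by
  rw [PySem.Dict.items_counter, List.map_map]
  have : ((fun gc : String × Int => F gc.1 * gc.2) ∘ fun k => (k, (L.count k : Int)))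
      = fun k => F k * (L.count k : Int) := by funext k; rfl
  rw [this]
  exact sum_count L (PySem.Set.ofList L) (PySem.Set.nodup_ofList L)
    (fun x hx => (PySem.Set.mem_ofList L x).2 hx) F

lemma sum_swap {α β : Type} (l1 : List α) (l2 : List β) (f : α → β → Int) :
    (l1.map (fun a => (l2.map (f a)).sum)).sum = (l2.map (fun b => (l1.map (fun a => f a b)).sum)).sum := by
  induction l1 with
  | nil => simp
  | cons a l1 ih =>
    simp only [List.map_cons, List.sum_cons, ih]
    rw [← PySem.List.sum_map_add_int]

lemma sum_flatMap_map (s : List String) (F : String → Int) :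
    ((allGrams s).map F).sum = (s.map (fun word => ((grams word).map F).sum)).sum := by
  unfold allGrams
  rw [List.map_flatMap]
  induction s with
  | nil => simp
  | cons w s ih => simp [List.flatMap_cons, ih]

-- the heart of the equivalence: per dictionary, A's score equals B's score
lemma score_eq (s : List String) (d : PySem.Dict String Int) (hnd : d.keys.Nodup) :
    bTotal (bCounts s) d = scoreA s d := by
  rw [bCounts_eq, bTotal_eq]
  have hstep : ∀ kv : String × Int,
      ((PySem.Dict.counter (allGrams s)).items.map
        (fun gc => if PySem.Str.isIn gc.1 kv.1 then kv.2 * gc.2 else 0)).sum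
      = ((allGrams s).map (fun g => if PySem.Str.isIn g kv.1 then kv.2 else 0)).sum := by
    intro kv
    have h1 : (fun gc : String × Int => if PySem.Str.isIn gc.1 kv.1 then kv.2 * gc.2 else 0)
        = (fun gc : String × Int => (if PySem.Str.isIn gc.1 kv.1 then kv.2 else 0) * gc.2) := by
      funext gc; split <;> simp
    rw [h1, sum_items_counter (allGrams s) (fun g => if PySem.Str.isIn g kv.1 then kv.2 else 0)]
  have h2 : (d.items.map (fun kv =>
      ((PySem.Dict.counter (allGrams s)).items.map
        (fun gc => if PySem.Str.isIn gc.1 kv.1 then kv.2 * gc.2 else 0)).sum)).sum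
      = (d.items.map (fun kv =>
        ((allGrams s).map (fun g => if PySem.Str.isIn g kv.1 then kv.2 else 0)).sum)).sum := by
    exact congrArg List.sum (List.map_congr_left (fun kv _ => hstep kv))
  rw [h2, PySem.Dict.items_eq_map_keys d hnd 0, List.map_map]
  have h3 : ((fun kv : String × Int =>
      ((allGrams s).map (fun g => if PySem.Str.isIn g kv.1 then kv.2 else 0)).sum) ∘
      fun k => (k, d.getD k 0))
      = fun key => ((allGrams s).map (fun g => if PySem.Str.isIn g key then d.getD key 0 else 0)).sum := by
    funext key; rfl
  rw [h3]
  have h4 : d.keys.map (fun key =>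
        ((allGrams s).map (fun g => if PySem.Str.isIn g key then d.getD key 0 else 0)).sum)
      = d.keys.map (fun key => (s.map (fun word =>
          ((grams word).map (fun g => if PySem.Str.isIn g key then d.getD key 0 else 0)).sum)).sum) := by
    exact List.map_congr_left (fun key _ => by
      rw [sum_flatMap_map s (fun g => if PySem.Str.isIn g key then d.getD key 0 else 0)])
  rw [h4, sum_swap d.keys s (fun key word =>
    ((grams word).map (fun g => if PySem.Str.isIn g key then d.getD key 0 else 0)).sum)]
  rfl

-- ===== VERDICT (by name: the statement is the Claim_ definition above) =====
theorem similarity_plus_spec : Claim_equal_similarity_plus := by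
  intro s dictionary similar _ _
  unfold Spec_similarity_plus
  show similarity_plus s dictionary similar
      = (PySem.List.enumerate dictionary 0).foldl (fun sim p =>
          pyAddAt sim p.1 (bTotal (bCounts s) (PySem.Dict.ofList p.2))) similar
  rw [similarity_plus_eq]
  have hf : (fun (sim : List Int) (p : Int × List (String × Int)) =>
      pyAddAt sim p.1 (scoreA s (PySem.Dict.ofList p.2)))
      = (fun sim p => pyAddAt sim p.1 (bTotal (bCounts s) (PySem.Dict.ofList p.2))) := by
    funext sim p
    rw [score_eq s (PySem.Dict.ofList p.2) (PySem.Dict.nodup_keys_ofList p.2)]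
  rw [hf]
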